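-- pv_equiv track=rewrite | github.com/doyee/ADBLogger | module/levelModule.py | __parseLogSettingsFile
-- ===== SOURCE A (Python) =====
-- LOG_GROUPS = ["overrideLogLevels", "CamxLogDebug", "CamxLogError", "CamxLogWarning", "CamxLogConfig", "CamxLogInfo", "CamxLogVerbose", "CamxLogCoreCfg"]
--
-- LOG_MASK_ENABLE = [("System Log", True, "systemLogEnable"), ("Offline Log", False, "enableAsciiLogging"), ("DRQ Log", False, "logDRQEnable"), ("Metadata Log", False, "logMetaEnable")]
--
-- def __parseLogSettingsFile(lines, isExclude):
--     toReturn = []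
--     for line in lines:
--         flag = True
--         for logMask in LOG_GROUPS:
--             keyWord = logMask + "="
--             if line.count(keyWord) > 0:
--                 flag = False
--                 break
--         if not flag:
--             if not isExclude:
--                 toReturn.append(line)
--             continue
--         for des, value, logMask in LOG_MASK_ENABLE:
--             keyWord = logMask + "="
--             if line.count(keyWord) > 0:
--                 flag = False
--                 break
--         if not flag:
--             if not isExclude:
--                 toReturn.append(line)
--             continue
--         elif isExclude:
--             toReturn.append(line)
--     return toReturn
-- ===== SOURCE B (Python) =====
-- LOG_GROUPS = ["overrideLogLevels", "CamxLogDebug", "CamxLogError", "CamxLogWarning", "CamxLogConfig", "CamxLogInfo", "CamxLogVerbose", "CamxLogCoreCfg"]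
--
-- LOG_MASK_ENABLE = [("System Log", True, "systemLogEnable"), ("Offline Log", False, "enableAsciiLogging"), ("DRQ Log", False, "logDRQEnable"), ("Metadata Log", False, "logMetaEnable")]
--
-- # Every keyword ends in '=': instead of running a substring search per keyword,
-- # scan each line once for '=' characters and check whether the text before an
-- # '=' ends with one of the bare keyword names.
-- BASES = LOG_GROUPS + [m[2] for m in LOG_MASK_ENABLE]
--
-- def __parseLogSettingsFile(lines, isExclude):
--     out = []
--     for line in lines:
--         matched = False
--         for i, c in enumerate(line):
--             if c == '=' and any(line[:i].endswith(w) for w in BASES):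
--                 matched = True
--                 break
--         if matched != bool(isExclude):
--             out.append(line)
--     return out
-- ===== Notes on version B (the rewrite author's own statement) =====
-- stated objective: alternative
-- what changed: Instead of A's per-keyword substring search (count of 'name=' for each entry of two tables, with flag/break/continue), B anchors on the '=' character: it scans each line once over its character positions, and at each '=' checks whether the preceding prefix ends with one of the bare keyword names, keeping the line when that match result differs from isExclude.
import Mathlib
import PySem

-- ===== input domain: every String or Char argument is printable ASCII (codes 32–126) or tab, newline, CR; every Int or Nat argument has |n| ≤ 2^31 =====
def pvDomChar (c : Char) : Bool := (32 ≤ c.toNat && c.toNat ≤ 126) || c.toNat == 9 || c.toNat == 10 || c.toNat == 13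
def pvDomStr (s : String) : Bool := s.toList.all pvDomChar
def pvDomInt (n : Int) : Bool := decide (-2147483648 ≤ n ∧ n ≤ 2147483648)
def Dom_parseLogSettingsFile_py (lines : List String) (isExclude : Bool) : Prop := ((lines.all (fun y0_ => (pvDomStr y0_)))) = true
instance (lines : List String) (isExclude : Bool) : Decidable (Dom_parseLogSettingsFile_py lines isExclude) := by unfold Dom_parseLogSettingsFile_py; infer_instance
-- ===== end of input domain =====

-- B replaces A's per-keyword substring searches with a single scan of each line
-- anchored on '=' characters, suffix-matching the bare keyword names (objective: alternative).

-- ===== PORT A =====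
def LOG_GROUPS : List String :=
  ["overrideLogLevels", "CamxLogDebug", "CamxLogError", "CamxLogWarning",
   "CamxLogConfig", "CamxLogInfo", "CamxLogVerbose", "CamxLogCoreCfg"]

def LOG_MASK_ENABLE : List (String × Bool × String) :=
  [("System Log", true, "systemLogEnable"), ("Offline Log", false, "enableAsciiLogging"),
   ("DRQ Log", false, "logDRQEnable"), ("Metadata Log", false, "logMetaEnable")]

-- 'for logMask in LOG_GROUPS: keyWord = logMask + "="; if line.count(keyWord) > 0: flag = False; break'
def pvLoopGroups : List String → String → Bool → Bool
  | [], _, flag => flag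
  | logMask :: rest, line, flag =>
      if PySem.Str.count line (logMask ++ "=") > 0 then false
      else pvLoopGroups rest line flag

-- 'for des, value, logMask in LOG_MASK_ENABLE: …' (same break pattern)
def pvLoopMasks : List (String × Bool × String) → String → Bool → Bool
  | [], _, flag => flag
  | m :: rest, line, flag =>
      if PySem.Str.count line (m.2.2 ++ "=") > 0 then false
      else pvLoopMasks rest line flag

def parseLogSettingsFile_py (lines : List String) (isExclude : Bool) : List String :=
  lines.foldl (fun toReturn line =>
    let flag := pvLoopGroups LOG_GROUPS line true
    if !flag then
      (if !isExclude then toReturn ++ [line] else toReturn)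
    else
      let flag2 := pvLoopMasks LOG_MASK_ENABLE line flag
      if !flag2 then
        (if !isExclude then toReturn ++ [line] else toReturn)
      else if isExclude then toReturn ++ [line] else toReturn) []

-- ===== PORT B =====
-- BASES = LOG_GROUPS + [m[2] for m in LOG_MASK_ENABLE]
def pvBases : List String := LOG_GROUPS ++ LOG_MASK_ENABLE.map (fun m => m.2.2)

-- 'for i, c in enumerate(line): if c == '=' and any(line[:i].endswith(w) for w in BASES): matched = True; break'
-- line[:i] with i a nonnegative enumerate index is exactly take i.toNat; endswith is PySem.Chars.endswith (exact).
def pvMatchLoop : List (Int × Char) → List Char → Bool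
  | [], _ => false
  | p :: rest, cs =>
      if p.2 == '=' && pvBases.any (fun w => PySem.Chars.endswith (cs.take p.1.toNat) w.toList) then
        true
      else pvMatchLoop rest cs

def parseLogSettingsFile_py_alt (lines : List String) (isExclude : Bool) : List String :=
  lines.foldl (fun out line =>
    let matched := pvMatchLoop (PySem.List.enumerate line.toList) line.toList
    if matched != isExclude then out ++ [line] else out) []

-- ===== PRECONDITION & SPEC =====
def Spec_parseLogSettingsFile_py (lines : List String) (isExclude : Bool) (out : List String) : Prop := out = parseLogSettingsFile_py_alt lines isExclude
instance (lines : List String) (isExclude : Bool) (out : List String) : Decidable (Spec_parseLogSettingsFile_py lines isExclude out) := by unfold Spec_parseLogSettingsFile_py; infer_instance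

-- ===== CLAIM (what is proved, stated in full; the proofs are below) =====
def Claim_equal_parseLogSettingsFile_py : Prop := ∀ (lines : List String) (isExclude : Bool), Dom_parseLogSettingsFile_py lines isExclude → Spec_parseLogSettingsFile_py lines isExclude (parseLogSettingsFile_py lines isExclude)

-- ===== LEMMAS AND PROOFS =====

-- the counting loop never decreases the accumulator
theorem pv_le_count_go (sub : List Char) :
    ∀ (fuel : Nat) (l : List Char) (acc : Nat), acc ≤ PySem.Chars.count.go sub fuel l acc := by
  intro fuel
  induction fuel with
  | zero => intro l acc; cases l <;> simp [PySem.Chars.count.go]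
  | succ n ih =>
    intro l acc
    cases l with
    | nil => simp [PySem.Chars.count.go]
    | cons h t =>
      simp only [PySem.Chars.count.go]
      split
      · exact le_trans (Nat.le_succ acc) (ih _ _)
      · exact ih _ _

-- the counting loop strictly increases the accumulator iff sub occurs in l
theorem pv_count_go_pos (sub : List Char) (hsub : sub ≠ []) :
    ∀ (fuel : Nat) (l : List Char), l.length ≤ fuel →
      ∀ acc : Nat, (acc < PySem.Chars.count.go sub fuel l acc ↔ sub <:+: l) := by
  intro fuel
  induction fuel with
  | zero =>
    intro l hl acc
    have hnil : l = [] := List.eq_nil_of_length_eq_zero (Nat.le_zero.mp hl)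
    subst hnil
    simp [PySem.Chars.count.go]
    intro t
    exact hsub t
  | succ n ih =>
    intro l hl acc
    cases l with
    | nil =>
      simp [PySem.Chars.count.go]
      intro h
      exact hsub h
    | cons h t =>
      simp only [PySem.Chars.count.go]
      split
      · rename_i hpre
        constructor
        · intro _
          exact ((List.isPrefixOf_iff_prefix).mp hpre).isInfix
        · intro _
          exact lt_of_lt_of_le (Nat.lt_succ_self acc) (pv_le_count_go sub _ _ _)
      · rename_i hpre
        have hnotpre : ¬ sub <+: (h :: t) := fun hp => hpre ((List.isPrefixOf_iff_prefix).mpr hp)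
        have ht : t.length ≤ n := Nat.succ_le_succ_iff.mp hl
        rw [ih t ht acc, List.infix_cons_iff]
        constructor
        · exact Or.inr
        · rintro (hp | hs)
          · exact absurd hp hnotpre
          · exact hs

theorem pv_countPos_eq_isIn (line g : String) :
    (decide (PySem.Str.count line (g ++ "=") > 0)) = PySem.Str.isIn (g ++ "=") line := by
  have hne : (g ++ "=").toList ≠ [] := by
    simp [String.toList_append]
  by_cases h : (g ++ "=").toList <:+: line.toList
  · have h1 : PySem.Str.isIn (g ++ "=") line = true := (PySem.Str.isIn_iff_infix _ _).mpr h
    rw [h1]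
    simp only [decide_eq_true_iff]
    unfold PySem.Str.count PySem.Chars.count
    rw [if_neg (by simpa [List.isEmpty_iff] using hne)]
    exact (pv_count_go_pos _ hne _ _ (le_refl _) 0).mpr h
  · have h1 : PySem.Str.isIn (g ++ "=") line = false := by
      cases h2 : PySem.Str.isIn (g ++ "=") line
      · rfl
      · exact absurd ((PySem.Str.isIn_iff_infix _ _).mp h2) h
    rw [h1]
    simp only [decide_eq_false_iff_not, not_lt, Nat.le_zero]
    unfold PySem.Str.count PySem.Chars.count
    rw [if_neg (by simpa [List.isEmpty_iff] using hne)]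
    have := (pv_count_go_pos _ hne _ _ (le_refl line.toList.length) 0).not.mpr h
    omega

theorem pv_loopGroups_eq (gs : List String) (line : String) (flag : Bool) :
    pvLoopGroups gs line flag =
      (flag && !(gs.any (fun g => PySem.Str.isIn (g ++ "=") line))) := by
  induction gs with
  | nil => simp [pvLoopGroups]
  | cons g rest ih =>
    show (if PySem.Str.count line (g ++ "=") > 0 then false else pvLoopGroups rest line flag) = _
    by_cases h : PySem.Str.count line (g ++ "=") > 0
    · rw [if_pos h]
      have hg : PySem.Str.isIn (g ++ "=") line = true := by
        rw [← pv_countPos_eq_isIn]; simpa using h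
      simp at hg
      simp [List.any_cons, hg]
    · rw [if_neg h, ih]
      have hg : PySem.Str.isIn (g ++ "=") line = false := by
        rw [← pv_countPos_eq_isIn]; simpa using h
      simp at hg
      simp [List.any_cons, hg]

theorem pv_loopMasks_eq (ms : List (String × Bool × String)) (line : String) (flag : Bool) :
    pvLoopMasks ms line flag =
      (flag && !(ms.any (fun m => PySem.Str.isIn (m.2.2 ++ "=") line))) := by
  induction ms with
  | nil => simp [pvLoopMasks]
  | cons m rest ih =>
    show (if PySem.Str.count line (m.2.2 ++ "=") > 0 then false else pvLoopMasks rest line flag) = _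
    by_cases h : PySem.Str.count line (m.2.2 ++ "=") > 0
    · rw [if_pos h]
      have hm : PySem.Str.isIn (m.2.2 ++ "=") line = true := by
        rw [← pv_countPos_eq_isIn]; simpa using h
      simp at hm
      simp [List.any_cons, hm]
    · rw [if_neg h, ih]
      have hm : PySem.Str.isIn (m.2.2 ++ "=") line = false := by
        rw [← pv_countPos_eq_isIn]; simpa using h
      simp at hm
      simp [List.any_cons, hm]

-- B's search loop with break is the 'any' of its condition
theorem pv_matchLoop_eq_any (ps : List (Int × Char)) (cs : List Char) :
    pvMatchLoop ps cs =
      ps.any (fun p => p.2 == '=' && pvBases.any (fun w => PySem.Chars.endswith (cs.take p.1.toNat) w.toList)) := by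
  induction ps with
  | nil => simp [pvMatchLoop]
  | cons p rest ih =>
    show (if _ then true else pvMatchLoop rest cs) = _
    by_cases h : (p.2 == '=' && pvBases.any (fun w => PySem.Chars.endswith (cs.take p.1.toNat) w.toList)) = true
    · simp [h]
    · simp only [List.any_cons, h, if_neg h, Bool.false_or]
      exact ih

-- occurrence of w++"=" as an infix ↔ some '=' position whose prefix ends with w
theorem pv_anchor_iff (w cs : List Char) :
    (w ++ ['=']) <:+: cs ↔ ∃ k : Nat, ∃ _ : k < cs.length, cs[k] = '=' ∧ w <:+ cs.take k := by
  constructor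
  · rintro ⟨s, t, hst⟩
    refine ⟨s.length + w.length, ?_, ?_, ?_⟩
    · subst hst; simp
    · have : s ++ (w ++ ['=']) ++ t = (s ++ w) ++ ('=' :: t) := by simp
      rw [this] at hst
      subst hst
      have hk : s.length + w.length = (s ++ w).length := by simp
      rw [List.getElem_append_right (by omega)]
      simp
    · have : s ++ (w ++ ['=']) ++ t = (s ++ w) ++ ('=' :: t) := by simp
      rw [this] at hst
      subst hst
      rw [show s.length + w.length = (s ++ w).length by simp, List.take_left]
      exact ⟨s, rfl⟩
  · rintro ⟨k, hk, heq, u, hu⟩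
    refine ⟨u, cs.drop (k + 1), ?_⟩
    have h1 : cs = cs.take k ++ cs.drop k := (List.take_append_drop k cs).symm
    have h2 : cs.drop k = cs[k] :: cs.drop (k + 1) := List.drop_eq_getElem_cons hk
    rw [heq] at h2
    calc u ++ (w ++ ['=']) ++ cs.drop (k + 1)
        = (u ++ w) ++ ('=' :: cs.drop (k + 1)) := by simp
      _ = cs.take k ++ cs.drop k := by rw [hu, ← h2]
      _ = cs := List.take_append_drop k cs

-- B's matched flag equals "some keyword+'=' occurs in the line"
theorem pv_matched_eq (line : String) :
    pvMatchLoop (PySem.List.enumerate line.toList) line.toList =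
      pvBases.any (fun w => PySem.Str.isIn (w ++ "=") line) := by
  rw [pv_matchLoop_eq_any, Bool.eq_iff_iff]
  simp only [List.any_eq_true, PySem.List.mem_enumerate_iff, Bool.and_eq_true, beq_iff_eq]
  constructor
  · rintro ⟨p, ⟨k, hk, rfl⟩, heq, w, hw, hsuf⟩
    refine ⟨w, hw, ?_⟩
    rw [PySem.Str.isIn_iff_infix]
    simp only [String.toList_append]
    have : ((0 : Int) + (k : Int)).toNat = k := by omega
    rw [this] at hsuf
    exact (pv_anchor_iff w.toList line.toList).mpr
      ⟨k, hk, heq, (PySem.Chars.endswith_iff _ _).mp hsuf⟩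
  · rintro ⟨w, hw, hin⟩
    rw [PySem.Str.isIn_iff_infix] at hin
    simp only [String.toList_append] at hin
    obtain ⟨k, hk, heq, hsuf⟩ := (pv_anchor_iff w.toList line.toList).mp hin
    refine ⟨((0 : Int) + (k : Int), line.toList[k]), ⟨k, hk, rfl⟩, heq, w, hw, ?_⟩
    have : ((0 : Int) + (k : Int)).toNat = k := by omega
    rw [this]
    exact (PySem.Chars.endswith_iff _ _).mpr hsuf

-- the two per-line steps agree
theorem pv_step_eq (isExclude : Bool) (toReturn : List String) (line : String) :
    (let flag := pvLoopGroups LOG_GROUPS line true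
     if !flag then
       (if !isExclude then toReturn ++ [line] else toReturn)
     else
       let flag2 := pvLoopMasks LOG_MASK_ENABLE line flag
       if !flag2 then
         (if !isExclude then toReturn ++ [line] else toReturn)
       else if isExclude then toReturn ++ [line] else toReturn) =
    (let matched := pvMatchLoop (PySem.List.enumerate line.toList) line.toList
     if matched != isExclude then toReturn ++ [line] else toReturn) := by
  have hkw : pvMatchLoop (PySem.List.enumerate line.toList) line.toList =
      (LOG_GROUPS.any (fun g => PySem.Str.isIn (g ++ "=") line) ||
       LOG_MASK_ENABLE.any (fun m => PySem.Str.isIn (m.2.2 ++ "=") line)) := by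
    rw [pv_matched_eq]
    simp [pvBases, List.any_append, List.any_map, Function.comp_def]
  simp only [pv_loopGroups_eq, pv_loopMasks_eq, hkw]
  cases h1 : LOG_GROUPS.any (fun g => PySem.Str.isIn (g ++ "=") line) <;>
    cases h2 : LOG_MASK_ENABLE.any (fun m => PySem.Str.isIn (m.2.2 ++ "=") line) <;>
      cases isExclude <;> simp_all

-- ===== VERDICT (by name: the statement is the Claim_ definition above) =====
theorem parseLogSettingsFile_py_spec : Claim_equal_parseLogSettingsFile_py := by
  intro lines isExclude _
  unfold Spec_parseLogSettingsFile_py parseLogSettingsFile_py parseLogSettingsFile_py_alt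
  congr 1
  funext toReturn line
  exact pv_step_eq isExclude toReturn line
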